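-- pv_equiv track=rewrite | github.com/qitianfeng/easyCode | mcp-tools/04-generation/标准代码生成MCP服务器.py | _identify_layer
-- ===== SOURCE A (Python) =====
-- def _identify_layer(package_name, class_name, annotations, content):
--     """识别类属于哪一层"""
--     package_lower = package_name.lower()
--     class_lower = class_name.lower()
--
--     # 基于包名判断
--     if 'entity' in package_lower or 'model' in package_lower or 'domain' in package_lower:
--         return 'entity'
--     elif 'repository' in package_lower or 'dao' in package_lower or 'mapper' in package_lower:
--         return 'repository'
--     elif 'service' in package_lower:
--         return 'service'
--     elif 'controller' in package_lower or 'web' in package_lower or 'rest' in package_lower: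
--         return 'controller'
--     elif 'dto' in package_lower or 'vo' in package_lower or 'request' in package_lower or 'response' in package_lower:
--         return 'dto'
--
--     # 基于类名判断
--     if class_lower.endswith('entity') or class_lower.endswith('model'):
--         return 'entity'
--     elif class_lower.endswith('repository') or class_lower.endswith('dao') or class_lower.endswith('mapper'):
--         return 'repository'
--     elif class_lower.endswith('service') or class_lower.endswith('serviceimpl'):
--         return 'service'
--     elif class_lower.endswith('controller') or class_lower.endswith('resource'):
--         return 'controller'
--     elif class_lower.endswith('dto') or class_lower.endswith('vo') or class_lower.endswith('request') or class_lower.endswith('response'):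
--         return 'dto'
--
--     # 基于注解判断
--     for annotation in annotations:
--         if annotation in ['@Entity', '@Table']:
--             return 'entity'
--         elif annotation in ['@Repository', '@Mapper']:
--             return 'repository'
--         elif annotation in ['@Service', '@Component']:
--             return 'service'
--         elif annotation in ['@Controller', '@RestController']:
--             return 'controller'
--
--     return None
-- ===== SOURCE B (Python) =====
-- # B: flatten the rules into globally ranked keyword tables, collect EVERY match
-- # as a (rank, layer) candidate, and return the layer of the minimum-rank match
-- # (arg-min selection instead of A's early-return if/elif cascades).
--
-- _PKG_KEYWORDS = [
--     ('entity', 'entity'), ('model', 'entity'), ('domain', 'entity'),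
--     ('repository', 'repository'), ('dao', 'repository'), ('mapper', 'repository'),
--     ('service', 'service'),
--     ('controller', 'controller'), ('web', 'controller'), ('rest', 'controller'),
--     ('dto', 'dto'), ('vo', 'dto'), ('request', 'dto'), ('response', 'dto'),
-- ]
--
-- _SUF_KEYWORDS = [
--     ('entity', 'entity'), ('model', 'entity'),
--     ('repository', 'repository'), ('dao', 'repository'), ('mapper', 'repository'),
--     ('service', 'service'), ('serviceimpl', 'service'),
--     ('controller', 'controller'), ('resource', 'controller'),
--     ('dto', 'dto'), ('vo', 'dto'), ('request', 'dto'), ('response', 'dto'),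
-- ]
--
-- _ANN_LAYER = {
--     '@Entity': 'entity', '@Table': 'entity',
--     '@Repository': 'repository', '@Mapper': 'repository',
--     '@Service': 'service', '@Component': 'service',
--     '@Controller': 'controller', '@RestController': 'controller',
-- }
--
--
-- def _identify_layer(package_name, class_name, annotations, content):
--     pkg = package_name.lower()
--     cls = class_name.lower()
--     base = len(_PKG_KEYWORDS)
--     base2 = base + len(_SUF_KEYWORDS)
--     candidates = (
--         [(i, layer) for i, (kw, layer) in enumerate(_PKG_KEYWORDS) if kw in pkg]
--         + [(i, layer) for i, (suf, layer) in enumerate(_SUF_KEYWORDS, base) if cls.endswith(suf)]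
--         + [(i, _ANN_LAYER[a]) for i, a in enumerate(annotations, base2) if a in _ANN_LAYER]
--     )
--     if not candidates:
--         return None
--     best = candidates[0]
--     for cand in candidates[1:]:
--         if cand[0] < best[0]:
--             best = cand
--     return best[1]
-- ===== Notes on version B (the rewrite author's own statement) =====
-- stated objective: alternative
-- what changed: B flattens all rules into globally ranked flat keyword tables plus an annotation-to-layer dict, collects every matching rule as a (rank, layer) candidate via comprehensions, and returns the layer of the minimum-rank candidate with an arg-min selection loop, instead of A's three early-return if/elif cascades.
import Mathlib
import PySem

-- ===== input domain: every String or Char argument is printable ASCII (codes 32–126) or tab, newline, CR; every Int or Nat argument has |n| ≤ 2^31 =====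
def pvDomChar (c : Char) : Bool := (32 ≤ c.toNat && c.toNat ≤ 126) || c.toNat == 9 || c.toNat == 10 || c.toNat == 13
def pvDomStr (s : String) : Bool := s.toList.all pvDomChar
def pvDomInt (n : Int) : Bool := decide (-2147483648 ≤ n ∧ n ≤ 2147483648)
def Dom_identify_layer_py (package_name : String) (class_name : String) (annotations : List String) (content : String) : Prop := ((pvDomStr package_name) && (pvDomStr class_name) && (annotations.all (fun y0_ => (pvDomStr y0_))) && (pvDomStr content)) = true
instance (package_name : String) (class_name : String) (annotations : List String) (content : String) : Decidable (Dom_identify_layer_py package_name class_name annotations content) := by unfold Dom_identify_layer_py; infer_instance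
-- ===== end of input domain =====

-- B flattens the rules into globally ranked keyword tables, collects EVERY matching rule as a
-- (rank, layer) candidate and returns the layer of the minimum-rank candidate (arg-min selection),
-- instead of A's three early-return if/elif cascades (alternative decomposition, same cost).

-- ===== PORT A =====
-- Loop over annotations: per annotation an if/elif chain of list memberships (transliterates A's for-loop).
def pvAnnLoopA : List String → Option String
  | [] => none
  | annotation :: rest =>
    if ["@Entity", "@Table"].contains annotation then some "entity"
    else if ["@Repository", "@Mapper"].contains annotation then some "repository"
    else if ["@Service", "@Component"].contains annotation then some "service"
    else if ["@Controller", "@RestController"].contains annotation then some "controller"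
    else pvAnnLoopA rest

def identify_layer_py (package_name : String) (class_name : String) (annotations : List String) (content : String) : Option String :=
  let package_lower := PySem.Str.lower package_name
  let class_lower := PySem.Str.lower class_name
  if PySem.Str.isIn "entity" package_lower || PySem.Str.isIn "model" package_lower || PySem.Str.isIn "domain" package_lower then some "entity"
  else if PySem.Str.isIn "repository" package_lower || PySem.Str.isIn "dao" package_lower || PySem.Str.isIn "mapper" package_lower then some "repository"
  else if PySem.Str.isIn "service" package_lower then some "service"
  else if PySem.Str.isIn "controller" package_lower || PySem.Str.isIn "web" package_lower || PySem.Str.isIn "rest" package_lower then some "controller"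
  else if PySem.Str.isIn "dto" package_lower || PySem.Str.isIn "vo" package_lower || PySem.Str.isIn "request" package_lower || PySem.Str.isIn "response" package_lower then some "dto"
  else if PySem.Str.endswith class_lower "entity" || PySem.Str.endswith class_lower "model" then some "entity"
  else if PySem.Str.endswith class_lower "repository" || PySem.Str.endswith class_lower "dao" || PySem.Str.endswith class_lower "mapper" then some "repository"
  else if PySem.Str.endswith class_lower "service" || PySem.Str.endswith class_lower "serviceimpl" then some "service"
  else if PySem.Str.endswith class_lower "controller" || PySem.Str.endswith class_lower "resource" then some "controller"
  else if PySem.Str.endswith class_lower "dto" || PySem.Str.endswith class_lower "vo" || PySem.Str.endswith class_lower "request" || PySem.Str.endswith class_lower "response" then some "dto"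
  else pvAnnLoopA annotations

-- ===== PORT B =====
-- The module-level flattened keyword tables of Source B.
def pvPkgKeywords : List (String × String) :=
  [("entity", "entity"), ("model", "entity"), ("domain", "entity"),
   ("repository", "repository"), ("dao", "repository"), ("mapper", "repository"),
   ("service", "service"),
   ("controller", "controller"), ("web", "controller"), ("rest", "controller"),
   ("dto", "dto"), ("vo", "dto"), ("request", "dto"), ("response", "dto")]

def pvSufKeywords : List (String × String) :=
  [("entity", "entity"), ("model", "entity"),
   ("repository", "repository"), ("dao", "repository"), ("mapper", "repository"),
   ("service", "service"), ("serviceimpl", "service"),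
   ("controller", "controller"), ("resource", "controller"),
   ("dto", "dto"), ("vo", "dto"), ("request", "dto"), ("response", "dto")]

def pvAnnLayer : PySem.Dict String String :=
  PySem.Dict.ofList
    [("@Entity", "entity"), ("@Table", "entity"),
     ("@Repository", "repository"), ("@Mapper", "repository"),
     ("@Service", "service"), ("@Component", "service"),
     ("@Controller", "controller"), ("@RestController", "controller")]

-- Source B's 'best'-selection loop: best = candidates[0]; for cand in candidates[1:]: if cand[0] < best[0]: best = cand
def pvMinLoop : (Int × String) → List (Int × String) → (Int × String)
  | best, [] => best
  | best, cand :: rest => pvMinLoop (if cand.1 < best.1 then cand else best) rest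

def identify_layer_py_alt (package_name : String) (class_name : String) (annotations : List String) (content : String) : Option String :=
  let pkg := PySem.Str.lower package_name
  let cls := PySem.Str.lower class_name
  -- the three list comprehensions of Source B (enumerate starts 0, 14 = len(_PKG_KEYWORDS), 27 = that + len(_SUF_KEYWORDS));
  -- 'if a in _ANN_LAYER … _ANN_LAYER[a]' is ported exactly as the Option.map over the dict lookup
  let c1 := (PySem.List.enumerate pvPkgKeywords).filterMap
      (fun p => if PySem.Str.isIn p.2.1 pkg then some (p.1, p.2.2) else none)
  let c2 := (PySem.List.enumerate pvSufKeywords 14).filterMap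
      (fun p => if PySem.Str.endswith cls p.2.1 then some (p.1, p.2.2) else none)
  let c3 := (PySem.List.enumerate annotations 27).filterMap
      (fun p => (PySem.Dict.get? pvAnnLayer p.2).map (fun layer => (p.1, layer)))
  match c1 ++ c2 ++ c3 with
  | [] => none
  | best :: rest => some (pvMinLoop best rest).2

-- ===== PRECONDITION & SPEC =====
def Spec_identify_layer_py (package_name : String) (class_name : String) (annotations : List String) (content : String) (out : Option String) : Prop := out = identify_layer_py_alt package_name class_name annotations content
instance (package_name : String) (class_name : String) (annotations : List String) (content : String) (out : Option String) : Decidable (Spec_identify_layer_py package_name class_name annotations content out) := by unfold Spec_identify_layer_py; infer_instance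

-- ===== CLAIM (what is proved, stated in full; the proofs are below) =====
def Claim_equal_identify_layer_py : Prop := ∀ (package_name : String) (class_name : String) (annotations : List String) (content : String), Dom_identify_layer_py package_name class_name annotations content → Spec_identify_layer_py package_name class_name annotations content (identify_layer_py package_name class_name annotations content)

-- ===== LEMMAS AND PROOFS =====
set_option maxHeartbeats 1000000

-- Proof-side names for Source B's three candidate lists (the annotation one generalised over the start rank).
def pvC1 (pkg : String) : List (Int × String) :=
  (PySem.List.enumerate pvPkgKeywords).filterMap
    (fun p => if PySem.Str.isIn p.2.1 pkg then some (p.1, p.2.2) else none)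
def pvC2 (cls : String) : List (Int × String) :=
  (PySem.List.enumerate pvSufKeywords 14).filterMap
    (fun p => if PySem.Str.endswith cls p.2.1 then some (p.1, p.2.2) else none)
def pvC3 (annotations : List String) (n : Int) : List (Int × String) :=
  (PySem.List.enumerate annotations n).filterMap
    (fun p => (PySem.Dict.get? pvAnnLayer p.2).map (fun layer => (p.1, layer)))

-- Source B's final selection, named for the proofs (definitionally the match in the port).
def pvSelect (l : List (Int × String)) : Option String :=
  match l with
  | [] => none
  | best :: rest => some (pvMinLoop best rest).2

-- If the first candidate has the least rank, the selection loop keeps it.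
theorem pvMinLoop_id (rest : List (Int × String)) (best : Int × String)
    (h : ∀ c ∈ rest, best.1 ≤ c.1) : pvMinLoop best rest = best := by
  induction rest with
  | nil => rfl
  | cons c r ih =>
    rw [pvMinLoop, if_neg (not_lt.mpr (h c (List.mem_cons_self)))]
    exact ih (fun x hx => h x (List.mem_cons_of_mem _ hx))

-- filterMap with a rank-preserving function keeps ranks strictly increasing.
theorem pvPair_filterMap {α : Type} (f : Int × α → Option (Int × String))
    (hf : ∀ p q, f p = some q → q.1 = p.1) :
    ∀ (l : List (Int × α)), l.Pairwise (fun p q => p.1 < q.1) →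
      (l.filterMap f).Pairwise (fun p q => p.1 < q.1) := by
  intro l hl
  induction l with
  | nil => simp
  | cons a t ih =>
    rw [List.pairwise_cons] at hl
    rw [List.filterMap_cons]
    cases hfa : f a with
    | none => exact ih hl.2
    | some b =>
      refine List.Pairwise.cons ?_ (ih hl.2)
      intro y hy
      rcases List.mem_filterMap.mp hy with ⟨x, hx, hfx⟩
      rw [hf a b hfa, hf x y hfx]
      exact hl.1 x hx

-- Ranks coming out of a filterMap over enumerate l n lie in [n, n + len l).
theorem pvRank_bounds {α : Type} (f : Int × α → Option (Int × String))
    (hf : ∀ p q, f p = some q → q.1 = p.1) (l : List α) (n : Int) :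
    ∀ y ∈ (PySem.List.enumerate l n).filterMap f, n ≤ y.1 ∧ y.1 < n + l.length := by
  intro y hy
  rcases List.mem_filterMap.mp hy with ⟨x, hx, hfx⟩
  rcases (PySem.List.mem_enumerate_iff _ _ _).mp hx with ⟨k, hk, rfl⟩
  rw [hf _ _ hfx]
  constructor
  · omega
  · have : (k : Int) < l.length := by exact_mod_cast hk
    omega

-- The two candidate-building functions preserve the rank component.
theorem pvFst_if {α : Type} (pkgTest : α → Bool) (p : Int × α × String) (q : Int × String)
    (h : (fun p : Int × α × String => if pkgTest p.2.1 then some (p.1, p.2.2) else none) p = some q) :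
    q.1 = p.1 := by
  dsimp only at h
  split_ifs at h
  cases h
  rfl

theorem pvFst_dict (p : Int × String) (q : Int × String)
    (h : (fun p : Int × String => (PySem.Dict.get? pvAnnLayer p.2).map (fun layer => (p.1, layer))) p = some q) :
    q.1 = p.1 := by
  dsimp only at h
  cases hg : PySem.Dict.get? pvAnnLayer p.2 <;> rw [hg] at h
  · cases h
  · cases h
    rfl

theorem pvPair_c1 (pkg : String) : (pvC1 pkg).Pairwise (fun p q => p.1 < q.1) :=
  pvPair_filterMap _ (pvFst_if (fun s => PySem.Str.isIn s pkg)) _ (PySem.List.pairwise_lt_enumerate _ _)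

theorem pvPair_c2 (cls : String) : (pvC2 cls).Pairwise (fun p q => p.1 < q.1) :=
  pvPair_filterMap _ (pvFst_if (fun s => PySem.Str.endswith cls s)) _ (PySem.List.pairwise_lt_enumerate _ _)

theorem pvPair_c3 (annotations : List String) (n : Int) :
    (pvC3 annotations n).Pairwise (fun p q => p.1 < q.1) :=
  pvPair_filterMap _ pvFst_dict _ (PySem.List.pairwise_lt_enumerate _ _)

-- The whole candidate list has strictly increasing ranks (phases occupy [0,14), [14,27), [27,…)).
theorem pvPair_all (pkg cls : String) (annotations : List String) :
    (pvC1 pkg ++ pvC2 cls ++ pvC3 annotations 27).Pairwise (fun p q => p.1 < q.1) := by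
  have hb1 := pvRank_bounds (l := pvPkgKeywords) (n := 0)
    (fun p => if PySem.Str.isIn p.2.1 pkg then some (p.1, p.2.2) else none)
    (pvFst_if (fun s => PySem.Str.isIn s pkg))
  have hb2 := pvRank_bounds (l := pvSufKeywords) (n := 14)
    (fun p => if PySem.Str.endswith cls p.2.1 then some (p.1, p.2.2) else none)
    (pvFst_if (fun s => PySem.Str.endswith cls s))
  have hb3 := pvRank_bounds (l := annotations) (n := 27)
    (fun p => (PySem.Dict.get? pvAnnLayer p.2).map (fun layer => (p.1, layer)))
    pvFst_dict
  have hlen1 : ((pvPkgKeywords.length : Int)) = 14 := by rfl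
  have hlen2 : ((pvSufKeywords.length : Int)) = 13 := by rfl
  rw [List.pairwise_append]
  refine ⟨?_, pvPair_c3 annotations 27, ?_⟩
  · rw [List.pairwise_append]
    refine ⟨pvPair_c1 pkg, pvPair_c2 cls, ?_⟩
    intro a ha b hb
    have h1 := (hb1 a ha).2
    have h2 := (hb2 b hb).1
    rw [hlen1] at h1
    omega
  · intro a ha b hb
    have h3 := (hb3 b hb).1
    rcases List.mem_append.mp ha with h | h
    · have h1 := (hb1 a h).2
      rw [hlen1] at h1
      omega
    · have h2 := (hb2 a h).2
      rw [hlen2] at h2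
      omega

-- On a strictly rank-increasing candidate list the selection loop returns the head's layer.
theorem pvSelect_eq_head (l : List (Int × String))
    (h : l.Pairwise (fun p q => p.1 < q.1)) :
    pvSelect l = l.head?.map (·.2) := by
  cases l with
  | nil => rfl
  | cons best rest =>
    rw [List.pairwise_cons] at h
    simp [pvSelect, pvMinLoop_id rest best (fun c hc => le_of_lt (h.1 c hc))]

-- head? of a filterMap, one step; turns the literal tables into if-chains.
theorem pvHead?_filterMap_cons {α β : Type} (f : α → Option β) (x : α) (xs : List α) :
    (List.filterMap f (x :: xs)).head? = (f x).or (List.filterMap f xs).head? := by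
  rw [List.filterMap_cons]
  cases f x <;> simp

theorem pvOr_if' {α : Type} (c : Bool) (v : α) (o k : Option α) :
    Option.or (if c then some v else o) k = if c then some v else Option.or o k := by
  cases c <;> simp

theorem pvIf_orb {α : Type} (a b : Bool) (x y : α) :
    (if a || b then x else y) = if a then x else if b then x else y := by
  cases a <;> simp

theorem pvMap_if {α β : Type} (c : Bool) (v : α) (o : Option α) (f : α → β) :
    (if c then some v else o).map f = if c then some (f v) else o.map f := by
  cases c <;> simp

theorem pvMap_none {α β : Type} (f : α → β) : (none : Option α).map f = none := rfl

theorem pvMap_or {α β : Type} (o t : Option α) (f : α → β) :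
    (o.or t).map f = (o.map f).or (t.map f) := by
  cases o <;> simp

theorem pvBeqComm (a s : String) : (a == s) = (s == a) := by
  by_cases h : a = s
  · subst h; rfl
  · rw [beq_eq_false_iff_ne.mpr h, beq_eq_false_iff_ne.mpr (Ne.symm h)]

-- A prefix-test phase: the head of a filterMap over an enumerated keyword table, with
-- fallback k, is the foldr of the table's if-chain (generic in the test).
theorem pvKwHead (test : String → Bool) (l : List (String × String)) (n : Int) (k : Option String) :
    Option.or (((PySem.List.enumerate l n).filterMap
        (fun p => if test p.2.1 then some (p.1, p.2.2) else none)).head?.map (·.2)) k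
      = l.foldr (fun kw acc => if test kw.1 then some kw.2 else acc) k := by
  induction l generalizing n with
  | nil => rfl
  | cons x xs ih =>
    rw [PySem.List.enumerate_cons, pvHead?_filterMap_cons]
    dsimp only
    simp only [pvMap_if, Option.none_or, pvOr_if']
    rw [ih (n + 1)]
    rfl

-- Phase 1: A's package if/elif cascade is the head of Source B's package candidate list.
theorem pvPkgPhase (pl : String) (k : Option String) :
    (if PySem.Str.isIn "entity" pl || PySem.Str.isIn "model" pl || PySem.Str.isIn "domain" pl then some "entity"
     else if PySem.Str.isIn "repository" pl || PySem.Str.isIn "dao" pl || PySem.Str.isIn "mapper" pl then some "repository"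
     else if PySem.Str.isIn "service" pl then some "service"
     else if PySem.Str.isIn "controller" pl || PySem.Str.isIn "web" pl || PySem.Str.isIn "rest" pl then some "controller"
     else if PySem.Str.isIn "dto" pl || PySem.Str.isIn "vo" pl || PySem.Str.isIn "request" pl || PySem.Str.isIn "response" pl then some "dto"
     else k) = Option.or ((pvC1 pl).head?.map (·.2)) k := by
  rw [pvC1, pvKwHead (fun s => PySem.Str.isIn s pl)]
  simp only [pvPkgKeywords, List.foldr_cons, List.foldr_nil, pvIf_orb]

-- Phase 2: A's class-name cascade is the head of Source B's suffix candidate list.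
theorem pvClsPhase (cl : String) (k : Option String) :
    (if PySem.Str.endswith cl "entity" || PySem.Str.endswith cl "model" then some "entity"
     else if PySem.Str.endswith cl "repository" || PySem.Str.endswith cl "dao" || PySem.Str.endswith cl "mapper" then some "repository"
     else if PySem.Str.endswith cl "service" || PySem.Str.endswith cl "serviceimpl" then some "service"
     else if PySem.Str.endswith cl "controller" || PySem.Str.endswith cl "resource" then some "controller"
     else if PySem.Str.endswith cl "dto" || PySem.Str.endswith cl "vo" || PySem.Str.endswith cl "request" || PySem.Str.endswith cl "response" then some "dto"
     else k) = Option.or ((pvC2 cl).head?.map (·.2)) k := by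
  rw [pvC2, pvKwHead (fun s => PySem.Str.endswith cl s)]
  simp only [pvSufKeywords, List.foldr_cons, List.foldr_nil, pvIf_orb]

-- The literal annotation dict, looked up at a, is A's inner if/elif chain of memberships.
theorem pvDictChain (a : String) :
    PySem.Dict.get? pvAnnLayer a =
      (if ["@Entity", "@Table"].contains a then some "entity"
       else if ["@Repository", "@Mapper"].contains a then some "repository"
       else if ["@Service", "@Component"].contains a then some "service"
       else if ["@Controller", "@RestController"].contains a then some "controller"
       else none) := by
  have hmk : pvAnnLayer = PySem.Dict.mk
      [("@Entity", "entity"), ("@Table", "entity"),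
       ("@Repository", "repository"), ("@Mapper", "repository"),
       ("@Service", "service"), ("@Component", "service"),
       ("@Controller", "controller"), ("@RestController", "controller")] := by rfl
  rw [hmk]
  simp only [PySem.Dict.get?_mk_cons, List.contains_cons, List.contains_nil, Bool.or_false,
    pvBeqComm a, pvIf_orb]
  have hnil : (PySem.Dict.mk ([] : List (String × String))).get? a = none := rfl
  rw [hnil]

-- One step of Source B's annotation candidate list.
theorem pvC3_head_cons (a : String) (rest : List String) (n : Int) :
    (pvC3 (a :: rest) n).head? =
      ((PySem.Dict.get? pvAnnLayer a).map (fun layer => (n, layer))).or (pvC3 rest (n + 1)).head? := by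
  rw [pvC3, PySem.List.enumerate_cons, pvHead?_filterMap_cons]
  rfl

-- Phase 3: A's annotation for-loop is the head of Source B's annotation candidate list.
theorem pvAnnPhase (l : List String) (n : Int) :
    pvAnnLoopA l = (pvC3 l n).head?.map (·.2) := by
  induction l generalizing n with
  | nil => rfl
  | cons a rest ih =>
    rw [pvAnnLoopA, pvC3_head_cons, pvDictChain a]
    simp only [pvMap_if, pvMap_none, Option.none_or, pvOr_if']
    rw [← ih (n + 1)]

-- ===== VERDICT (by name: the statement is the Claim_ definition above) =====
theorem identify_layer_py_spec : Claim_equal_identify_layer_py := by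
  intro package_name class_name annotations content _
  unfold Spec_identify_layer_py identify_layer_py identify_layer_py_alt
  rw [pvPkgPhase, pvClsPhase, pvAnnPhase _ 27]
  show Option.or ((pvC1 (PySem.Str.lower package_name)).head?.map (·.2))
      (Option.or ((pvC2 (PySem.Str.lower class_name)).head?.map (·.2))
        ((pvC3 annotations 27).head?.map (·.2))) =
    pvSelect (pvC1 (PySem.Str.lower package_name) ++ pvC2 (PySem.Str.lower class_name)
      ++ pvC3 annotations 27)
  rw [pvSelect_eq_head _ (pvPair_all _ _ _)]
  simp [List.head?_append, pvMap_or]
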